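-- pv_equiv track=rewrite | github.com/EitanTal/hunter | byte_packer.py | add_bits
-- ===== SOURCE A (Python) =====
-- def add_bits( data, bits_to_add ):
--     tmp_result = ''
--     for i in range(bits_to_add):
--         tmp_result = ('0' if (data %2==0) else '1') + tmp_result
--         data = data >> 1
--     result = ''
--     for x in tmp_result:
--         result = result + ('011' if (x=='1') else '001')
--     return result
-- ===== SOURCE B (Python) =====
-- def add_bits(data, bits_to_add):
--     return ''.join('011' if (data >> i) & 1 else '001'
--                    for i in reversed(range(bits_to_add)))
-- ===== Notes on version B (the rewrite author's own statement) =====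
-- stated objective: faster
-- what changed: Replaces A's two dependent passes (build a '0'/'1' binary string MSB-first by repeated halving and quadratic string prepending, then remap each char to a 3-bit code by quadratic appending) with a single comprehension that extracts bit i arithmetically via (data >> i) & 1 for i from bits_to_add-1 down to 0 and joins the codes once.
import Mathlib
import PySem

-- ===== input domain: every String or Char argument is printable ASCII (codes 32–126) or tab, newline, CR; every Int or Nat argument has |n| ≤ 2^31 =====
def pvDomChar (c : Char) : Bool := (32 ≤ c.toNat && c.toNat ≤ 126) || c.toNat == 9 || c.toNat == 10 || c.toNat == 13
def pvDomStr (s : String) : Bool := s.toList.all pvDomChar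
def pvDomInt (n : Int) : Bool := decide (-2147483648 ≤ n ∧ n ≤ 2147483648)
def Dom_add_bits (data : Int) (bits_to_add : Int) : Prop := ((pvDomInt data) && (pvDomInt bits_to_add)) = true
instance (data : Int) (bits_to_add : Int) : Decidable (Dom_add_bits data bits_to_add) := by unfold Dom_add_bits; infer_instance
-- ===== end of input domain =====

-- B replaces A's two dependent passes (build a '0'/'1' string by repeated halving, then
-- remap each char to a 3-bit code) with one pass that extracts each bit arithmetically
-- and joins the codes directly; objective: simpler.

-- ===== PORT A =====
def add_bits (data : Int) (bits_to_add : Int) : String :=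
  -- first loop: state (tmp_result, data); Python's 'data >> 1' is Int's arithmetic '>>> 1'
  let st := (PySem.List.pyRange 0 bits_to_add 1).foldl
      (fun (st : String × Int) _ =>
        ((if PySem.Int.mod st.2 2 == 0 then "0" else "1") ++ st.1, st.2 >>> (1 : Nat)))
      ("", data)
  -- second loop: over the characters of tmp_result
  st.1.toList.foldl (fun r x => r ++ (if x == '1' then "011" else "001")) ""

-- ===== PORT B =====
def add_bits_alt (data : Int) (bits_to_add : Int) : String :=
  -- ''.join('011' if (data >> i) & 1 else '001' for i in reversed(range(bits_to_add)));
  -- '(data >> i) & 1' is Python floor-mod by 2 of the arithmetic shift, exact on all ints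
  PySem.Str.join "" ((PySem.List.pyRange 0 bits_to_add 1).reverse.map
      (fun i => if PySem.Int.mod (data >>> i.toNat) 2 == 1 then "011" else "001"))

-- ===== PRECONDITION & SPEC =====
def Spec_add_bits (data : Int) (bits_to_add : Int) (out : String) : Prop := out = add_bits_alt data bits_to_add
instance (data : Int) (bits_to_add : Int) (out : String) : Decidable (Spec_add_bits data bits_to_add out) := by unfold Spec_add_bits; infer_instance

-- ===== CLAIM (what is proved, stated in full; the proofs are below) =====
def Claim_equal_add_bits : Prop := ∀ (data : Int) (bits_to_add : Int), Dom_add_bits data bits_to_add → Spec_add_bits data bits_to_add (add_bits data bits_to_add)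

-- ===== LEMMAS AND PROOFS =====

-- two arithmetic right shifts compose
theorem pvShift_shift (d : Int) (k : Nat) :
    (d >>> (1 : Nat)) >>> k = d >>> (k + 1) := by
  rw [Int.shiftRight_eq_div_pow, Int.shiftRight_eq_div_pow, Int.shiftRight_eq_div_pow,
      Int.ediv_ediv_of_nonneg (by positivity)]
  congr 1; push_cast; ring

-- the bit character A's first loop prepends for current data d
def pvBitChar (d : Int) : Char := if PySem.Int.mod d 2 == 0 then '0' else '1'

-- A's first loop: the characters of tmp_result are the bits k = n-1 … 0 of the original data
theorem pvLoopA (l : List Int) (d : Int) (tmp : String) :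
    ((l.foldl
      (fun (st : String × Int) _ =>
        ((if PySem.Int.mod st.2 2 == 0 then "0" else "1") ++ st.1, st.2 >>> (1 : Nat)))
      (tmp, d)).1).toList
    = ((List.range l.length).map (fun (k : Nat) => pvBitChar (d >>> k))).reverse ++ tmp.toList := by
  induction l generalizing d tmp with
  | nil => simp
  | cons a l ih =>
      simp only [List.foldl_cons, List.length_cons, ih, List.range_succ_eq_map]
      have h1 : ((if PySem.Int.mod d 2 == 0 then "0" else "1") ++ tmp).toList
          = pvBitChar d :: tmp.toList := by
        unfold pvBitChar; split <;> simp_all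
      rw [h1]
      simp [Function.comp_def, pvShift_shift]

-- A's second loop: appending one code per character is a flatten of the code map
theorem pvLoopA2 (cs : List Char) (r : String) :
    (cs.foldl (fun r x => r ++ (if x == '1' then "011" else "001")) r).toList
    = r.toList ++ (cs.map (fun x => if x == '1' then ("011" : String).toList else ("001" : String).toList)).flatten := by
  induction cs generalizing r with
  | nil => simp
  | cons c cs ih => simp only [List.foldl_cons, ih]; split <;> simp_all

-- ''.join is a flatten
theorem pvJoinNil (ls : List (List Char)) : PySem.Chars.join [] ls = ls.flatten := by
  induction ls with
  | nil => rfl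
  | cons a l ih =>
      cases l with
      | nil => simp [PySem.Chars.join, List.intercalate]
      | cons b t =>
          simp only [PySem.Chars.join, List.intercalate] at *
          simp [List.intersperse] at *
          simp [ih]

-- the per-bit codes agree: A's char test equals B's arithmetic bit test
theorem pvCode (d : Int) (k : Nat) :
    (if pvBitChar (d >>> k) == '1' then ("011" : String).toList else ("001" : String).toList)
    = (if PySem.Int.mod (d >>> (((0 + (k : Int)).toNat : Nat) : Int)) 2 == 1 then ("011" : String) else "001").toList := by
  rw [Int.shiftRight_natCast_right]
  simp only [zero_add, Int.toNat_natCast]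
  have hm : PySem.Int.mod (d >>> k) 2 = (d >>> k) % 2 := PySem.Int.mod_eq_emod_of_pos (by norm_num)
  have h2 : (d >>> k) % 2 = 0 ∨ (d >>> k) % 2 = 1 := by omega
  unfold pvBitChar
  rcases h2 with h | h <;> simp only [hm, h] <;> simp

-- ===== VERDICT (by name: the statement is the Claim_ definition above) =====
theorem add_bits_spec : Claim_equal_add_bits := by
  intro data bits_to_add _
  unfold Spec_add_bits
  apply String.toList_inj.mp
  unfold add_bits add_bits_alt
  rw [pvLoopA2, pvLoopA]
  simp only [PySem.Str.toList_join, pvJoinNil, PySem.List.pyRange_one, List.map_reverse,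
    List.map_map, Function.comp_def, String.toList_empty, List.append_nil, List.nil_append,
    List.length_map, List.length_range]
  congr 1
  congr 1
  refine List.map_congr_left ?_
  intro k _
  exact pvCode data k
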